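-- pv_equiv track=rewrite | github.com/CodeForContribute/Algos-DataStructures | TreeCodes/TreeTraversal/depth_binary_tree_from_pre_order.py | findDepthRecursion
-- ===== SOURCE A (Python) =====
-- def findDepthRecursion(tree, n, index):
--     if index[0] >= n or tree[index[0]] == 'l':
--         return 0
--     index[0] += 1
--     left = findDepthRecursion(tree, n, index)
--     index[0] += 1
--     right = findDepthRecursion(tree, n, index)
--     return max(left, right) + 1
-- ===== SOURCE B (Python) =====
-- def findDepthRecursion(tree, n, index):
--     # Iterative stack machine replacing the recursion; performs the same
--     # in-place mutations of index[0] at the same points as the recursive version.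
--     stack = []  # frames: [stage, left_depth]; stage 0 = left pending, 1 = right pending
--     entering = True
--     ret = 0
--     while True:
--         if entering:
--             if index[0] >= n or tree[index[0]] == 'l':
--                 ret = 0
--                 entering = False
--             else:
--                 index[0] += 1
--                 stack.append([0, 0])
--         else:
--             if not stack:
--                 return ret
--             frame = stack[-1]
--             if frame[0] == 0:
--                 frame[0] = 1
--                 frame[1] = ret
--                 index[0] += 1
--                 entering = True
--             else:
--                 ret = max(frame[1], ret) + 1
--                 stack.pop()
-- ===== Notes on version B (the rewrite author's own statement) =====
-- stated objective: alternative
-- what changed: Replaces A's recursion with an explicit-stack state machine (frames holding stage and left-subtree depth, an entering/returning flag and a carried return value) that iterates instead of recursing.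
import Mathlib
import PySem

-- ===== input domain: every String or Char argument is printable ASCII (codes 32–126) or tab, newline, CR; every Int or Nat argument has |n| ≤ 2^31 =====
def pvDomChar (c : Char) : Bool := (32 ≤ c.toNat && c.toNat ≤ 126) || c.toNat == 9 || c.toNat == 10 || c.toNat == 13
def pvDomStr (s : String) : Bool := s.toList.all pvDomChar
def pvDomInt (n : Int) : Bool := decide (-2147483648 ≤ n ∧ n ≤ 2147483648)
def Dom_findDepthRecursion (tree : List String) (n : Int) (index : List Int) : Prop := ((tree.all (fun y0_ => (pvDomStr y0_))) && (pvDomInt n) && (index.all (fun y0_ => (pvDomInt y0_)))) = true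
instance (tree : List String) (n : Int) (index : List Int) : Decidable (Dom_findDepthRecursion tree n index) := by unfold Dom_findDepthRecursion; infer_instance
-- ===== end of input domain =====

-- B replaces A's recursion by an explicit stack machine (alternative decomposition,
-- same cost); both mutate index[0] identically in Python, the equivalence proved
-- here is about the return value (index is a List Int value in Lean).

-- ===== PORT A =====
-- The guard 'index[0] >= n or tree[index[0]] == "l"': none = IndexError (excluded by Pre_),
-- some true = return 0, some false = internal node.
def pvGuard (tree : List String) (n i : Int) : Option Bool :=
  if i ≥ n then some true
  else match PySem.List.pyGet? tree i with
    | none => none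
    | some s => some (s = "l")

-- Recursion of A with the mutable index[0] threaded through as state:
-- returns (depth, final value of index[0]); fuel bounds the recursion depth
-- (a call at index i recurses only at indices > i and stops once the index
-- reaches n, so (n - i).toNat + 1 levels always suffice — proved below).
def goA (tree : List String) (n : Int) : Nat → Int → Option (Int × Int)
  | 0, _ => none
  | f + 1, i =>
    match pvGuard tree n i with
    | none => none
    | some true => some (0, i)
    | some false =>
      match goA tree n f (i + 1) with                 -- index[0] += 1; left = ...
      | none => none
      | some (l, i1) =>
        match goA tree n f (i1 + 1) with              -- index[0] += 1; right = ...
        | none => none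
        | some (r, i2) => some (max l r + 1, i2)

def findDepthRecursion (tree : List String) (n : Int) (index : List Int) : Int :=
  match index with
  | [] => 0                                           -- IndexError in Python; outside Pre_
  | i :: _ =>
    match goA tree n ((n - i).toNat + 1) i with
    | some (d, _) => d
    | none => 0                                       -- IndexError in Python; outside Pre_

-- ===== PORT B =====
-- One step state: stack of frames (stage, left_depth), entering flag, ret, index[0].
-- Fuel bounds the number of loop iterations (8*(n - i).toNat + 2 suffices, proved below).
def runB (tree : List String) (n : Int) (fuel : Nat) (stack : List (Int × Int))
    (entering : Bool) (ret i : Int) : Option Int :=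
  match fuel with
  | 0 => none
  | f + 1 =>
    if entering then
      match pvGuard tree n i with
      | none => none
      | some true => runB tree n f stack false 0 i
      | some false => runB tree n f ((0, 0) :: stack) true ret (i + 1)
    else
      match stack with
      | [] => some ret
      | (stage, left) :: rest =>
        if stage = 0 then runB tree n f ((1, ret) :: rest) true ret (i + 1)
        else runB tree n f rest false (max left ret + 1) i

def findDepthRecursion_alt (tree : List String) (n : Int) (index : List Int) : Int :=
  match index with
  | [] => 0                                           -- IndexError in Python; outside Pre_
  | i :: _ => (runB tree n (8 * (n - i).toNat + 2) [] true 0 i).getD 0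

-- ===== PRECONDITION & SPEC =====
-- balSeg tree i k: over the k consecutive read positions i, i+1, …, i+k-1
-- (Python indexing, negative = from the end), the count of 'l' entries minus
-- the count of non-'l' entries.  The traversal starting at position i < n
-- completes exactly when some prefix of the reads has one more leaf than
-- internal nodes (balSeg = 1); otherwise the reads run past the end of tree.
def balSeg (tree : List String) (i : Int) : Nat → Int
  | 0 => 0
  | k + 1 => balSeg tree i k + (if PySem.List.pyGet? tree (i + k) = some "l" then 1 else -1)

-- Pre_ excludes exactly the inputs on which the Python raises IndexError (both A and
-- B raise there, with identical reads): empty index, a start index out of range, or —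
-- when n exceeds len(tree) — a preorder segment that never completes before running
-- off the end of tree (no prefix of reads with balSeg = 1).  On every input where A
-- returns, Pre_ holds.
def Pre_findDepthRecursion (tree : List String) (n : Int) (index : List Int) : Prop :=
  index ≠ [] ∧
    (n ≤ index.headI ∨
      (-(tree.length : Int) ≤ index.headI ∧
        (n ≤ (tree.length : Int) ∨
          ∃ k ≤ 2 * tree.length, 1 ≤ k ∧ index.headI + (k : Int) ≤ (tree.length : Int) ∧
            balSeg tree index.headI k = 1)))
instance (tree : List String) (n : Int) (index : List Int) : Decidable (Pre_findDepthRecursion tree n index) := by unfold Pre_findDepthRecursion; infer_instance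

def pvWitness_findDepthRecursion : List String × Int × List Int :=
  (["n", "n", "l", "l", "l"], 5, [0])

def Spec_findDepthRecursion (tree : List String) (n : Int) (index : List Int) (out : Int) : Prop := out = findDepthRecursion_alt tree n index
instance (tree : List String) (n : Int) (index : List Int) (out : Int) : Decidable (Spec_findDepthRecursion tree n index out) := by unfold Spec_findDepthRecursion; infer_instance

-- ===== CLAIM (what is proved, stated in full; the proofs are below) =====
def Claim_equal_findDepthRecursion : Prop := ∀ (tree : List String) (n : Int) (index : List Int), Dom_findDepthRecursion tree n index → Pre_findDepthRecursion tree n index → Spec_findDepthRecursion tree n index (findDepthRecursion tree n index)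

-- ===== LEMMAS AND PROOFS =====

-- One unfolding step of runB.
theorem runB_succ (tree : List String) (n : Int) (f : Nat) (stack : List (Int × Int))
    (entering : Bool) (ret i : Int) :
    runB tree n (f + 1) stack entering ret i =
      if entering then
        match pvGuard tree n i with
        | none => none
        | some true => runB tree n f stack false 0 i
        | some false => runB tree n f ((0, 0) :: stack) true ret (i + 1)
      else
        match stack with
        | [] => some ret
        | (stage, left) :: rest =>
          if stage = 0 then runB tree n f ((1, ret) :: rest) true ret (i + 1)
          else runB tree n f rest false (max left ret + 1) i := by
  rw [runB.eq_def]

-- runB is monotone in fuel.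
theorem runB_mono (tree : List String) (n : Int) :
    ∀ (f : Nat) (stack : List (Int × Int)) (e : Bool) (ret i : Int) (v : Int),
      runB tree n f stack e ret i = some v → runB tree n (f + 1) stack e ret i = some v := by
  intro f
  induction f with
  | zero => intro stack e ret i v h; simp [runB] at h
  | succ f ih =>
    intro stack e ret i v h
    rw [runB_succ] at h
    rw [runB_succ]
    cases e with
    | true =>
      simp only [if_true] at h ⊢
      cases hg : pvGuard tree n i with
      | none => rw [hg] at h; simp at h
      | some b =>
        rw [hg] at h
        cases b with
        | true => exact ih _ _ _ _ _ h
        | false => exact ih _ _ _ _ _ h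
    | false =>
      simp only [Bool.false_eq_true, if_false] at h ⊢
      cases stack with
      | nil => exact h
      | cons fr rest =>
        obtain ⟨stage, left⟩ := fr
        dsimp only at h ⊢
        by_cases hs : stage = 0
        · rw [if_pos hs] at h ⊢; exact ih _ _ _ _ _ h
        · rw [if_neg hs] at h ⊢; exact ih _ _ _ _ _ h

theorem runB_le (tree : List String) (n : Int) {f g : Nat} (hfg : f ≤ g) :
    ∀ {stack : List (Int × Int)} {e : Bool} {ret i v : Int},
      runB tree n f stack e ret i = some v → runB tree n g stack e ret i = some v := by
  induction g with
  | zero => intro stack e ret i v h; have : f = 0 := by omega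
            subst this; simp [runB] at h
  | succ g ih =>
    intro stack e ret i v h
    rcases Nat.lt_or_ge f (g + 1) with hlt | hge
    · exact runB_mono tree n g _ _ _ _ _ (ih (by omega) h)
    · have : f = g + 1 := by omega
      subst this; exact h

-- The final index is at least the initial one.
theorem goA_final_ge (tree : List String) (n : Int) :
    ∀ (f : Nat) (i : Int) (d i' : Int),
      goA tree n f i = some (d, i') → i ≤ i' := by
  intro f
  induction f with
  | zero => intro i d i' h; simp [goA] at h
  | succ f ih =>
    intro i d i' h
    rw [goA] at h
    cases hg : pvGuard tree n i with
    | none => rw [hg] at h; simp at h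
    | some b =>
      rw [hg] at h
      cases b with
      | true => simp at h; omega
      | false =>
        simp only at h
        cases hl : goA tree n f (i + 1) with
        | none => rw [hl] at h; simp at h
        | some p =>
          rw [hl] at h
          obtain ⟨l, i1⟩ := p
          dsimp only at h
          cases hr : goA tree n f (i1 + 1) with
          | none => rw [hr] at h; simp at h
          | some q =>
            rw [hr] at h
            obtain ⟨r, i2⟩ := q
            simp at h
            have h1 := ih _ _ _ hl
            have h2 := ih _ _ _ hr
            omega

-- If the guard is 'false' the index is below n.
theorem guard_false_lt (tree : List String) (n i : Int)
    (h : pvGuard tree n i = some false) : i < n := by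
  unfold pvGuard at h
  by_cases hi : i ≥ n
  · rw [if_pos hi] at h; simp at h
  · omega

-- Depth and final-index bounds needed for the fuel arithmetic:
-- d ≤ max 0 (n - i), and if i ≤ n then i' ≤ n + d.
theorem goA_bounds (tree : List String) (n : Int) :
    ∀ (f : Nat) (i : Int) (d i' : Int), goA tree n f i = some (d, i') →
      0 ≤ d ∧ d ≤ max 0 (n - i) ∧ (i ≤ n → i' ≤ n + d) := by
  intro f
  induction f with
  | zero => intro i d i' h; simp [goA] at h
  | succ f ih =>
    intro i d i' h
    rw [goA] at h
    cases hg : pvGuard tree n i with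
    | none => rw [hg] at h; simp at h
    | some b =>
      rw [hg] at h
      cases b with
      | true => simp at h; omega
      | false =>
        simp only at h
        have hin : i < n := guard_false_lt tree n i hg
        cases hl : goA tree n f (i + 1) with
        | none => rw [hl] at h; simp at h
        | some p =>
          rw [hl] at h
          obtain ⟨l, i1⟩ := p
          dsimp only at h
          cases hr : goA tree n f (i1 + 1) with
          | none => rw [hr] at h; simp at h
          | some q =>
            rw [hr] at h
            obtain ⟨r, i2⟩ := q
            simp at h
            obtain ⟨hd, hi'⟩ := h
            have hL := ih _ _ _ hl
            have hR := ih _ _ _ hr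
            have hge1 := goA_final_ge tree n f (i + 1) l i1 hl
            have hge2 := goA_final_ge tree n f (i1 + 1) r i2 hr
            have hi1 : i1 ≤ n + l := hL.2.2 (by omega)
            refine ⟨by omega, by omega, fun _ => ?_⟩
            by_cases hc : i1 + 1 ≤ n
            · have hi2 : i2 ≤ n + r := hR.2.2 hc
              omega
            · have : pvGuard tree n (i1 + 1) = some true := by
                unfold pvGuard; rw [if_pos (by omega)]
              rcases f with _ | f'
              · simp [goA] at hr
              · rw [goA, this] at hr
                simp at hr
                omega

-- Sufficient fuel for goA when all indices below n are readable (n ≤ len branch).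
theorem goA_some (tree : List String) (n : Int)
    (hsafe : ∀ j : Int, j < n → -(tree.length : Int) ≤ j → j < n → (PySem.List.pyGet? tree j).isSome) :
    ∀ (f : Nat) (i : Int), (n - i).toNat < f → -(tree.length : Int) ≤ i →
      (goA tree n f i).isSome := by
  intro f
  induction f with
  | zero => intro i h; omega
  | succ f ih =>
    intro i hf hlow
    rw [goA]
    by_cases hi : i ≥ n
    · simp [pvGuard, hi]
    · have hget : (PySem.List.pyGet? tree i).isSome :=
        hsafe i (by omega) hlow (by omega)
      cases hg : PySem.List.pyGet? tree i with
      | none => rw [hg] at hget; simp at hget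
      | some s =>
        have hguard : pvGuard tree n i = some (decide (s = "l")) := by
          unfold pvGuard; rw [if_neg hi, hg]
        rw [hguard]
        by_cases hs : s = "l"
        · simp [hs]
        · simp only [hs, decide_false]
          have h1 : (goA tree n f (i + 1)).isSome := ih (i + 1) (by omega) (by omega)
          cases hl : goA tree n f (i + 1) with
          | none => rw [hl] at h1; simp at h1
          | some p =>
            obtain ⟨l, i1⟩ := p
            have hge1 := goA_final_ge tree n f (i + 1) l i1 hl
            have h2 : (goA tree n f (i1 + 1)).isSome := ih (i1 + 1) (by omega) (by omega)
            cases hr : goA tree n f (i1 + 1) with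
            | none => rw [hr] at h2; simp at h2
            | some q =>
              obtain ⟨r, i2⟩ := q
              dsimp only
              rw [hr]
              simp

-- Additivity of the read balance over consecutive segments.
theorem balSeg_add (tree : List String) (a : Int) (m : Nat) :
    ∀ p : Nat, balSeg tree a (m + p) = balSeg tree a m + balSeg tree (a + m) p := by
  intro p
  induction p with
  | zero => simp [balSeg]
  | succ p ih =>
    have e : m + (p + 1) = (m + p) + 1 := by omega
    rw [e]
    show balSeg tree a ((m + p) + 1) = _
    rw [balSeg, ih, balSeg]
    have : a + (↑(m + p) : Int) = (a + ↑m) + ↑p := by push_cast; ring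
    rw [this]
    ring

-- Discrete intermediate value: ±1 prefix sums reaching ≥ 1 pass through 1.
theorem bal_reach_one (tree : List String) (a : Int) :
    ∀ m : Nat, 1 ≤ balSeg tree a m → ∃ j, j ≤ m ∧ balSeg tree a j = 1 := by
  intro m
  induction m with
  | zero => intro h; simp [balSeg] at h
  | succ m ih =>
    intro h
    by_cases h1 : balSeg tree a (m + 1) = 1
    · exact ⟨m + 1, le_refl _, h1⟩
    · have hstep : balSeg tree a (m + 1) = balSeg tree a m + (if PySem.List.pyGet? tree (a + m) = some "l" then 1 else -1) := by
        rw [balSeg]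
      have hm : 1 ≤ balSeg tree a m := by
        by_cases hc : PySem.List.pyGet? tree (a + m) = some "l"
        · rw [if_pos hc] at hstep; omega
        · rw [if_neg hc] at hstep; omega
      obtain ⟨j, hj, hj1⟩ := ih hm
      exact ⟨j, by omega, hj1⟩

-- Reads in range are readable.
theorem pyGet_some_of_range (tree : List String) (i : Int)
    (h1 : -(tree.length : Int) ≤ i) (h2 : i < (tree.length : Int)) :
    ∃ s, PySem.List.pyGet? tree i = some s := by
  cases hg : PySem.List.pyGet? tree i with
  | none =>
    rw [PySem.List.pyGet?_eq_none_iff] at hg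
    exact absurd (by unfold PySem.Raise.InRange; omega) hg
  | some s => exact ⟨s, rfl⟩

-- COMPLETION (len < n branch): if k is the least prefix length with balance 1
-- (one more leaf than internal nodes) and the whole segment fits in tree, then
-- A's recursion succeeds and stops exactly at position i + k - 1.
theorem goA_complete (tree : List String) (n : Int) (hn : (tree.length : Int) < n) :
    ∀ (f : Nat) (i : Int) (k : Nat), k < f → 1 ≤ k →
      -(tree.length : Int) ≤ i → i + (k : Int) ≤ (tree.length : Int) →
      balSeg tree i k = 1 → (∀ j : Nat, 1 ≤ j → j < k → balSeg tree i j ≠ 1) →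
      ∃ d : Int, goA tree n f i = some (d, i + (k : Int) - 1) := by
  intro f
  induction f with
  | zero => intro i k hk; omega
  | succ f ih =>
    intro i k hk hk1 hlow hhigh hbal hmin
    have hilen : i < (tree.length : Int) := by omega
    obtain ⟨s, hs⟩ := pyGet_some_of_range tree i hlow hilen
    have hin : ¬ i ≥ n := by omega
    have hguard : pvGuard tree n i = some (decide (s = "l")) := by
      unfold pvGuard; rw [if_neg hin, hs]
    have hbal1 : balSeg tree i 1 = (if PySem.List.pyGet? tree i = some "l" then 1 else -1) := by
      show balSeg tree i (0 + 1) = _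
      rw [balSeg, balSeg]
      norm_num
    by_cases hleaf : s = "l"
    · -- leaf: k must be 1, goA returns (0, i)
      have hb1 : balSeg tree i 1 = 1 := by
        rw [hbal1, if_pos (by rw [hs, hleaf])]
      have hk_eq : k = 1 := by
        by_contra hne
        exact hmin 1 (by omega) (by omega) hb1
      subst hk_eq
      refine ⟨0, ?_⟩
      rw [goA, hguard]
      simp [hleaf]
    · -- internal node
      have hb1 : balSeg tree i 1 = -1 := by
        rw [hbal1, if_neg (by rw [hs]; simp [hleaf])]
      have hkne1 : k ≠ 1 := by intro he; rw [he, hb1] at hbal; omega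
      have hk2 : 2 ≤ k := by omega
      -- balance of the tail after the first read
      have htail : balSeg tree (i + 1) (k - 1) = 2 := by
        have := balSeg_add tree i 1 (k - 1)
        have e : 1 + (k - 1) = k := by omega
        rw [e] at this
        have e1 : i + (1 : Nat) = i + 1 := by norm_num
        rw [e1] at this
        omega
      -- minimal left witness via Nat.find
      have hex : ∃ j, balSeg tree (i + 1) j = 1 := by
        obtain ⟨j, _, hj1⟩ := bal_reach_one tree (i + 1) (k - 1) (by omega)
        exact ⟨j, hj1⟩
      classical
      let k1 := Nat.find hex
      have hk1spec : balSeg tree (i + 1) k1 = 1 := Nat.find_spec hex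
      have hk1min : ∀ j, j < k1 → balSeg tree (i + 1) j ≠ 1 := fun j hj => Nat.find_min hex hj
      have hk1le : k1 ≤ k - 1 := by
        obtain ⟨j, hj, hj1⟩ := bal_reach_one tree (i + 1) (k - 1) (by omega)
        exact le_trans (Nat.find_min' hex hj1) hj
      have hk1pos : 1 ≤ k1 := by
        rcases Nat.eq_zero_or_pos k1 with h0 | h
        · rw [h0] at hk1spec; simp [balSeg] at hk1spec
        · omega
      -- k1 < k - 1 strictly? not needed; but k2 := k - 1 - k1 ≥ 1:
      have hk2pos : 1 ≤ k - 1 - k1 := by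
        rcases Nat.lt_or_ge k1 (k - 1) with h | h
        · omega
        · have : k1 = k - 1 := by omega
          rw [this] at hk1spec
          omega
      set k2 := k - 1 - k1 with hk2def
      -- balance of the right segment
      have hright : balSeg tree (i + 1 + k1) k2 = 1 := by
        have := balSeg_add tree (i + 1) k1 k2
        have e : k1 + k2 = k - 1 := by omega
        rw [e, htail, hk1spec] at this
        omega
      -- minimality of k2 from minimality of k
      have hrmin : ∀ j : Nat, 1 ≤ j → j < k2 → balSeg tree (i + 1 + k1) j ≠ 1 := by
        intro j hj1 hjk hbj
        have h1 : balSeg tree i (1 + (k1 + j)) = balSeg tree i 1 + balSeg tree (i + 1) (k1 + j) := by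
          have := balSeg_add tree i 1 (k1 + j)
          have e1 : i + (1 : Nat) = i + 1 := by norm_num
          rw [e1] at this
          exact this
        have h2 : balSeg tree (i + 1) (k1 + j) = balSeg tree (i + 1) k1 + balSeg tree (i + 1 + k1) j := by
          have := balSeg_add tree (i + 1) k1 j
          have e1 : (i + 1) + (k1 : Int) = i + 1 + k1 := by ring
          rw [e1] at this
          exact this
        have : balSeg tree i (1 + (k1 + j)) = 1 := by
          rw [h1, h2, hb1, hk1spec, hbj]; ring
        exact hmin (1 + (k1 + j)) (by omega) (by omega) this
      -- left recursive call
      obtain ⟨l, hl⟩ := ih (i + 1) k1 (by omega) hk1pos (by omega)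
        (by omega) hk1spec
        (fun j _ hj => hk1min j hj)
      -- right recursive call at i1 + 1 = i + k1 + 1
      have hi1 : i + 1 + (k1 : Int) - 1 + 1 = i + 1 + k1 := by ring
      obtain ⟨r, hr⟩ := ih (i + 1 + k1) k2 (by omega) hk2pos (by omega)
        (by omega) hright hrmin
      refine ⟨max l r + 1, ?_⟩
      rw [goA, hguard]
      simp only [hleaf, decide_false]
      rw [hl]
      dsimp only
      rw [hi1, hr]
      have : i + 1 + (k1 : Int) + (k2 : Int) - 1 = i + (k : Int) - 1 := by
        have : (k1 : Int) + (k2 : Int) = (k : Int) - 1 := by omega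
        omega
      rw [this]

-- SIMULATION: a successful run of A's recursion from index i corresponds to k
-- machine steps taking state (stack, entering, ret, i) to (stack, returning, d, i'),
-- for every stack and ret, with k ≤ 4*(i' - i) + 1.
theorem simB (tree : List String) (n : Int) :
    ∀ (f : Nat) (i : Int) (d i' : Int), goA tree n f i = some (d, i') →
      ∃ k : Nat, ((k : Int) ≤ 4 * (i' - i) + 1) ∧
        ∀ (fB : Nat) (stack : List (Int × Int)) (ret : Int),
          runB tree n (k + fB) stack true ret i = runB tree n fB stack false d i' := by
  intro f
  induction f with
  | zero => intro i d i' h; simp [goA] at h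
  | succ f ih =>
    intro i d i' h
    rw [goA] at h
    cases hg : pvGuard tree n i with
    | none => rw [hg] at h; simp at h
    | some b =>
      rw [hg] at h
      cases b with
      | true =>
        simp at h
        obtain ⟨hd, hi'⟩ := h
        refine ⟨1, by omega, fun fB stack ret => ?_⟩
        have : (1 + fB) = fB + 1 := by omega
        rw [this, runB_succ]
        simp only [if_true]
        rw [hg, hd, hi']
      | false =>
        simp only at h
        cases hl : goA tree n f (i + 1) with
        | none => rw [hl] at h; simp at h
        | some p =>
          rw [hl] at h
          obtain ⟨l, i1⟩ := p
          dsimp only at h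
          cases hr : goA tree n f (i1 + 1) with
          | none => rw [hr] at h; simp at h
          | some q =>
            rw [hr] at h
            obtain ⟨r, i2⟩ := q
            simp at h
            obtain ⟨hd, hi'⟩ := h
            obtain ⟨k1, hk1, hs1⟩ := ih _ _ _ hl
            obtain ⟨k2, hk2, hs2⟩ := ih _ _ _ hr
            have hge1 := goA_final_ge tree n f (i + 1) l i1 hl
            have hge2 := goA_final_ge tree n f (i1 + 1) r i2 hr
            refine ⟨1 + k1 + 1 + k2 + 1, by push_cast; omega, fun fB stack ret => ?_⟩
            have e1 : (1 + k1 + 1 + k2 + 1 + fB) = (k1 + (1 + (k2 + (1 + fB)))) + 1 := by omega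
            have e2 : (1 + (k2 + (1 + fB))) = (k2 + (1 + fB)) + 1 := by omega
            have e3 : (1 + fB) = fB + 1 := by omega
            have step1 : runB tree n ((k1 + (1 + (k2 + (1 + fB)))) + 1) stack true ret i
                = runB tree n (k1 + (1 + (k2 + (1 + fB)))) ((0, 0) :: stack) true ret (i + 1) := by
              rw [runB_succ, hg]; simp
            have step2 := hs1 (1 + (k2 + (1 + fB))) ((0, 0) :: stack) ret
            have step3 : runB tree n ((k2 + (1 + fB)) + 1) ((0, 0) :: stack) false l i1
                = runB tree n (k2 + (1 + fB)) ((1, l) :: stack) true l (i1 + 1) := by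
              rw [runB_succ]; simp
            have step4 := hs2 (1 + fB) ((1, l) :: stack) l
            have step5 : runB tree n (fB + 1) ((1, l) :: stack) false r i2
                = runB tree n fB stack false (max l r + 1) i2 := by
              rw [runB_succ]; norm_num
            rw [e1, step1, step2, e2, step3, step4, e3, step5, hd, hi']

-- Main equivalence on a single starting index, under Pre_'s condition.
theorem main_eq (tree : List String) (n i : Int)
    (hpre : n ≤ i ∨
      (-(tree.length : Int) ≤ i ∧
        (n ≤ (tree.length : Int) ∨
          ∃ k ≤ 2 * tree.length, 1 ≤ k ∧ i + (k : Int) ≤ (tree.length : Int) ∧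
            balSeg tree i k = 1))) :
    (match goA tree n ((n - i).toNat + 1) i with
      | some (d, _) => d
      | none => 0) = (runB tree n (8 * (n - i).toNat + 2) [] true 0 i).getD 0 := by
  by_cases hni : n ≤ i
  · have ht : (n - i).toNat = 0 := by omega
    have hguard : pvGuard tree n i = some true := by
      unfold pvGuard; rw [if_pos (by omega)]
    rw [ht]
    have hA : goA tree n 1 i = some (0, i) := by rw [goA, hguard]
    have hB : runB tree n 2 [] true 0 i = some 0 := by
      simp [runB, hguard]
    simpa [hA] using congrArg (fun o => o.getD (0 : Int)) hB.symm
  · rcases hpre with h | ⟨hlow, hrest⟩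
    · omega
    · -- first establish that goA succeeds
      have hsucc : ∃ d i', goA tree n ((n - i).toNat + 1) i = some (d, i') := by
        rcases hrest with hn | ⟨k, hkb, hk1, hkfit, hkbal⟩
        · -- n ≤ len: every read below n is in range
          have hsafe : ∀ j : Int, j < n → -(tree.length : Int) ≤ j → j < n →
              (PySem.List.pyGet? tree j).isSome := by
            intro j _ hlo hj
            rw [Option.isSome_iff_ne_none]
            intro hnone
            rw [PySem.List.pyGet?_eq_none_iff] at hnone
            exact hnone (by unfold PySem.Raise.InRange; omega)
          have hsome := goA_some tree n hsafe ((n - i).toNat + 1) i (by omega) hlow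
          cases hA : goA tree n ((n - i).toNat + 1) i with
          | none => rw [hA] at hsome; simp at hsome
          | some p => exact ⟨p.1, p.2, by simp⟩
        · -- len < n: the segment completes at its least balanced prefix
          by_cases hlen : n ≤ (tree.length : Int)
          · -- also safe directly
            have hsafe : ∀ j : Int, j < n → -(tree.length : Int) ≤ j → j < n →
                (PySem.List.pyGet? tree j).isSome := by
              intro j _ hlo hj
              rw [Option.isSome_iff_ne_none]
              intro hnone
              rw [PySem.List.pyGet?_eq_none_iff] at hnone
              exact hnone (by unfold PySem.Raise.InRange; omega)
            have hsome := goA_some tree n hsafe ((n - i).toNat + 1) i (by omega) hlow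
            cases hA : goA tree n ((n - i).toNat + 1) i with
            | none => rw [hA] at hsome; simp at hsome
            | some p => exact ⟨p.1, p.2, by simp⟩
          · have hn : (tree.length : Int) < n := by omega
            classical
            have hex : ∃ j, balSeg tree i j = 1 := ⟨k, hkbal⟩
            have hmspec : balSeg tree i (Nat.find hex) = 1 := Nat.find_spec hex
            have hmle : Nat.find hex ≤ k := Nat.find_min' hex hkbal
            have hmpos : 1 ≤ Nat.find hex := by
              rcases Nat.eq_zero_or_pos (Nat.find hex) with h0 | h
              · rw [h0] at hmspec; simp [balSeg] at hmspec
              · omega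
            obtain ⟨d, hd⟩ := goA_complete tree n hn ((n - i).toNat + 1) i (Nat.find hex)
              (by omega) hmpos hlow (by omega) hmspec
              (fun j _ hj => Nat.find_min hex hj)
            exact ⟨d, _, hd⟩
      obtain ⟨d, i', hA⟩ := hsucc
      obtain ⟨hd0, hdle, hi'⟩ := goA_bounds tree n _ _ _ _ hA
      have hi'le : i' ≤ n + d := hi' (by omega)
      have hgei := goA_final_ge tree n _ _ _ _ hA
      obtain ⟨k, hk, hsim⟩ := simB tree n _ _ _ _ hA
      have hstep : runB tree n (k + 1) [] true 0 i = some d := by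
        rw [hsim 1 [] 0]
        simp [runB]
      have hfuel : k + 1 ≤ 8 * (n - i).toNat + 2 := by
        have h1 : (i' - i) ≤ 2 * (n - i) := by omega
        have h2 : ((n - i).toNat : Int) = n - i := by omega
        omega
      have hB := runB_le tree n hfuel hstep
      rw [hA, hB]
      rfl

-- ===== VERDICT (by name: the statement is the Claim_ definition above) =====
theorem findDepthRecursion_spec : Claim_equal_findDepthRecursion := by
  intro tree n index _ hpre
  unfold Spec_findDepthRecursion
  obtain ⟨hne, hpre2⟩ := hpre
  cases index with
  | nil => exact absurd rfl hne
  | cons i rest =>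
    simp only [List.headI] at hpre2
    unfold findDepthRecursion findDepthRecursion_alt
    exact main_eq tree n i hpre2
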